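-- pv_equiv track=rewrite | github.com/KubinGH/logia-tryhard-saga | Logia17/Etap 2/ulica.py | maksos
-- ===== SOURCE A (Python) =====
-- def maksos(A):
--     best_count = current_count = 1
--     first_counted = False; first_count = 1
--     for last, current in zip(A, A[1:]):
--         if current - last <= 3:
--             current_count += 1
--             best_count = max(best_count, current_count)
--         else:
--             if not first_counted:
--                 first_count = current_count
--                 first_counted = True
--             current_count = 1
--     if first_counted:
--         current_count += first_count
--         best_count = max(best_count, current_count)
--     return best_count
-- ===== SOURCE B (Python) =====
-- def maksos(A):
--     n = len(A)
--     breaks = [i for i, (last, cur) in enumerate(zip(A, A[1:]), 1) if cur - last > 3]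
--     if not breaks:
--         return max(n, 1)
--     best = breaks[0] + (n - breaks[-1])
--     for x, y in zip(breaks, breaks[1:]):
--         best = max(best, y - x)
--     return best
-- ===== Notes on version B (the rewrite author's own statement) =====
-- stated objective: alternative
-- what changed: B does not track run lengths at all: it collects the INDICES where the >3 break occurs via a filtering comprehension, then computes the answer as a closed-form reduction over break-index gaps (max of consecutive-break differences vs first break + n - last break), whereas A maintains a running max / current run / first-run flag inside one fold with a post-loop patch-up.
import Mathlib
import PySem

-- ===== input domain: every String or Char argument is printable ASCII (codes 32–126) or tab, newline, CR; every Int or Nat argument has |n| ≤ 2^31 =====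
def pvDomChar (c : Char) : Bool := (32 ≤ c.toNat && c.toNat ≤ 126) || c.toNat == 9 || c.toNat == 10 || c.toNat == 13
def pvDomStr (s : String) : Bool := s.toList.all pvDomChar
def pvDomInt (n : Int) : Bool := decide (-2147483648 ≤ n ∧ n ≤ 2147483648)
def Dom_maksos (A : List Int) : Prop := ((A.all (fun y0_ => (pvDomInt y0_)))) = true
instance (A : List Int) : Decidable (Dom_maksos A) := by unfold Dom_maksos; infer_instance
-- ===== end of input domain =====

-- B drops A's run-length bookkeeping entirely: it collects the break INDICES with a filtering
-- comprehension and reduces over break-index gaps (objective: alternative decomposition).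

-- ===== PORT A =====
-- loop body of A: state = (best_count, current_count, first_counted, first_count)
def maksosLoop (st : Int × Int × Bool × Int) (p : Int × Int) : Int × Int × Bool × Int :=
  if p.2 - p.1 ≤ 3 then
    (max st.1 (st.2.1 + 1), st.2.1 + 1, st.2.2.1, st.2.2.2)
  else if st.2.2.1 then (st.1, 1, st.2.2.1, st.2.2.2)
  else (st.1, 1, true, st.2.1)

-- A's code after the loop
def maksosFinish (st : Int × Int × Bool × Int) : Int :=
  if st.2.2.1 then max st.1 (st.2.1 + st.2.2.2) else st.1

-- zip(A, A[1:]): the slice A[1:] is exactly List.drop 1 (nonnegative start, no stop)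
def maksos (A : List Int) : Int :=
  maksosFinish ((A.zip (A.drop 1)).foldl maksosLoop (1, 1, false, 1))

-- ===== PORT B =====
-- breaks = [i for i, (last, cur) in enumerate(zip(A, A[1:]), 1) if cur - last > 3]
def maksosAltBreaks (A : List Int) : List Int :=
  ((PySem.List.enumerate (A.zip (A.drop 1)) 1).filter
    (fun ip => decide (3 < ip.2.2 - ip.2.1))).map Prod.fst

-- breaks[0] / breaks[-1] are read in the nonempty branch only, so headD/getLastD are exact there
def maksos_alt (A : List Int) : Int :=
  let breaks := maksosAltBreaks A
  if breaks.isEmpty then max (A.length : Int) 1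
  else
    (breaks.zip (breaks.drop 1)).foldl (fun best xy => max best (xy.2 - xy.1))
      (breaks.headD 0 + ((A.length : Int) - breaks.getLastD 0))

-- ===== PRECONDITION & SPEC =====
def Spec_maksos (A : List Int) (out : Int) : Prop := out = maksos_alt A
instance (A : List Int) (out : Int) : Decidable (Spec_maksos A out) := by unfold Spec_maksos; infer_instance

-- ===== CLAIM (what is proved, stated in full; the proofs are below) =====
def Claim_equal_maksos : Prop := ∀ (A : List Int), Dom_maksos A → Spec_maksos A (maksos A)

-- ===== LEMMAS AND PROOFS =====

-- break indices of a pair list, first pair numbered s (proof-side recursion)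
def brkOf (s : Int) (l : List (Int × Int)) : List Int :=
  match l with
  | [] => []
  | p :: t => if 3 < p.2 - p.1 then s :: brkOf (s + 1) t else brkOf (s + 1) t

-- running max of consecutive gaps of (p :: bs), accumulator a
def maxGaps (p : Int) (bs : List Int) (a : Int) : Int :=
  match bs with
  | [] => a
  | b :: t => maxGaps b t (max a (b - p))

-- A's loop state as a function of (breaks so far, pairs processed)
def stOf (bs : List Int) (k : Int) : Int × Int × Bool × Int :=
  (max (maxGaps 0 bs 1) (k + 1 - bs.getLastD 0), k + 1 - bs.getLastD 0, !bs.isEmpty, bs.headD 1)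

lemma brk_eq (l : List (Int × Int)) : ∀ s : Int,
    ((PySem.List.enumerate l s).filter (fun ip => decide (3 < ip.2.2 - ip.2.1))).map Prod.fst
      = brkOf s l := by
  induction l with
  | nil => intro s; simp [PySem.List.enumerate_nil, brkOf]
  | cons p t ih =>
      intro s
      rw [PySem.List.enumerate_cons]
      by_cases h : 3 < p.2 - p.1
      · simp [h, brkOf, ih]
      · simp [h, brkOf, ih]

lemma brk_mem (l : List (Int × Int)) : ∀ s : Int, ∀ x ∈ brkOf s l, s ≤ x ∧ x < s + l.length := by
  induction l with
  | nil => intro s x hx; simp [brkOf] at hx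
  | cons p t ih =>
      intro s x hx
      simp only [brkOf] at hx
      by_cases h : 3 < p.2 - p.1
      · rw [if_pos h] at hx
        rcases List.mem_cons.1 hx with hx | hx
        · subst hx; simp only [List.length_cons]; push_cast; omega
        · have := ih (s + 1) x hx; simp at this ⊢; omega
      · rw [if_neg h] at hx
        have := ih (s + 1) x hx; simp at this ⊢; omega

lemma maxGaps_le (bs : List Int) : ∀ p a : Int, a ≤ maxGaps p bs a := by
  induction bs with
  | nil => intro p a; simp [maxGaps]
  | cons b t ih =>
      intro p a
      simp only [maxGaps]
      exact le_trans (le_max_left a (b - p)) (ih b (max a (b - p)))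

lemma maxGaps_acc_max (bs : List Int) : ∀ p a b : Int,
    maxGaps p bs (max a b) = max (maxGaps p bs a) b := by
  induction bs with
  | nil => intro p a b; simp [maxGaps]
  | cons d t ih =>
      intro p a b
      simp only [maxGaps]
      rw [max_right_comm a b (d - p), ih]

lemma maxGaps_append (bs : List Int) : ∀ p a x : Int,
    maxGaps p (bs ++ [x]) a = max (maxGaps p bs a) (x - bs.getLastD p) := by
  induction bs with
  | nil => intro p a x; simp [maxGaps]
  | cons b t ih =>
      intro p a x
      simp only [List.cons_append, maxGaps, ih, List.getLastD_cons]

-- B's gap fold over zip(bs, bs[1:]) is maxGaps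
lemma gaps_fold (t : List Int) : ∀ (b init : Int),
    ((b :: t).zip t).foldl (fun best xy => max best (xy.2 - xy.1)) init = maxGaps b t init := by
  induction t with
  | nil => intro b init; simp [maxGaps]
  | cons c t' ih =>
      intro b init
      simp only [List.zip_cons_cons, List.foldl_cons, maxGaps]
      exact ih c (max init (c - b))

-- main loop invariant: A's fold, started at stOf bs k, lands at stOf (bs ++ brkOf (k+1) l) (k + |l|)
lemma loop_inv (l : List (Int × Int)) : ∀ (bs : List Int) (k : Int),
    bs.getLastD 0 ≤ k →
    l.foldl maksosLoop (stOf bs k) = stOf (bs ++ brkOf (k + 1) l) (k + l.length) := by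
  induction l with
  | nil => intro bs k _; simp [brkOf]
  | cons p t ih =>
      intro bs k hlb
      simp only [List.foldl_cons]
      by_cases h : 3 < p.2 - p.1
      · have hstep : maksosLoop (stOf bs k) p = stOf (bs ++ [k + 1]) (k + 1) := by
          have hG : (1:Int) ≤ maxGaps 0 bs 1 := maxGaps_le bs 0 1
          cases bs with
          | nil =>
              have hk : (0:Int) ≤ k := by simpa [List.getLastD] using hlb
              simp only [maksosLoop, stOf, if_neg (by omega : ¬ p.2 - p.1 ≤ 3),
                List.isEmpty_nil, Bool.not_true, Bool.false_eq_true, if_false,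
                List.nil_append, List.isEmpty_cons, Bool.not_false, List.headD_cons,
                List.getLastD_cons, List.getLastD_nil, maxGaps, Prod.mk.injEq]
              and_intros <;> first | trivial | omega
          | cons b rt =>
              simp only [maksosLoop, stOf, if_neg (by omega : ¬ p.2 - p.1 ≤ 3),
                List.isEmpty_cons, Bool.not_false, if_true, List.cons_append,
                List.headD_cons, List.getLastD_cons, Prod.mk.injEq]
              have happ := maxGaps_append (b :: rt) 0 1 (k + 1)
              simp only [List.cons_append, List.getLastD_cons] at happ
              rw [List.getLastD_concat, happ]
              have hG' : (1:Int) ≤ maxGaps 0 (b :: rt) 1 := maxGaps_le _ 0 1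
              and_intros <;> first | trivial | omega
        rw [hstep, brkOf, if_pos h]
        have := ih (bs ++ [k + 1]) (k + 1) (by simp)
        have harith : k + 1 + (t.length : Int) = k + ((p :: t).length : Int) := by
          simp only [List.length_cons]; push_cast; ring
        rw [this, List.append_assoc, List.singleton_append, harith]
      · have hstep : maksosLoop (stOf bs k) p = stOf bs (k + 1) := by
          simp only [maksosLoop, stOf, if_pos (by omega : p.2 - p.1 ≤ 3), Prod.mk.injEq]
          and_intros <;> first | trivial | omega
        rw [hstep, brkOf, if_neg h]
        have := ih bs (k + 1) (by omega)
        have harith : k + 1 + (t.length : Int) = k + ((p :: t).length : Int) := by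
          simp only [List.length_cons]; push_cast; ring
        rw [this, harith]

-- ===== VERDICT (by name: the statement is the Claim_ definition above) =====
theorem maksos_spec : Claim_equal_maksos := by
  intro A _
  unfold Spec_maksos maksos maksos_alt maksosAltBreaks
  have h0 : ((1:Int),(1:Int),false,(1:Int)) = stOf [] 0 := by simp [stOf, maxGaps]
  rw [brk_eq (A.zip (A.drop 1)) 1, h0, loop_inv (A.zip (A.drop 1)) [] 0 (by simp),
      show (0:Int) + 1 = 1 from rfl]
  have hmem := brk_mem (A.zip (A.drop 1)) 1
  have hlen : (A.zip (A.drop 1)).length = A.length - 1 := by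
    rw [List.length_zip, List.length_drop]; omega
  have hne : brkOf 1 (A.zip (A.drop 1)) ≠ [] → 1 ≤ (A.zip (A.drop 1)).length := by
    intro h
    cases hz : A.zip (A.drop 1) with
    | nil => rw [hz] at h; simp [brkOf] at h
    | cons _ _ => simp
  generalize hbs : brkOf 1 (A.zip (A.drop 1)) = bs at hmem hne ⊢
  cases bs with
  | nil =>
      simp only [List.nil_append, stOf, maksosFinish, List.isEmpty_nil, Bool.not_true,
        Bool.false_eq_true, if_false, if_true, List.getLastD_nil, maxGaps]
      omega
  | cons b1 rest =>
      have hL1 : 1 ≤ (A.zip (A.drop 1)).length := hne (by simp)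
      have hb1 : 1 ≤ b1 ∧ b1 < 1 + ((A.zip (A.drop 1)).length : Int) := by
        have := hmem b1 (by simp); omega
      have hlast : 1 ≤ (b1 :: rest).getLastD 0 ∧
          (b1 :: rest).getLastD 0 < 1 + ((A.zip (A.drop 1)).length : Int) := by
        have hm : (b1 :: rest).getLastD 0 ∈ b1 :: rest := by
          rw [List.getLastD_cons]; exact List.getLastD_mem_cons
        have := hmem _ hm; omega
      have hA : (A.length : Int) = ((A.zip (A.drop 1)).length : Int) + 1 := by omega
      simp only [List.nil_append, stOf, maksosFinish, List.isEmpty_cons, Bool.not_false,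
        if_true, Bool.false_eq_true, if_false, List.headD_cons,
        show (b1 :: rest).drop 1 = rest from rfl]
      rw [gaps_fold rest b1]
      have hA2 : maxGaps 0 (b1 :: rest) 1 = max (maxGaps b1 rest 1) b1 := by
        simp only [maxGaps]
        rw [show max (1:Int) (b1 - 0) = max 1 b1 by omega]
        exact maxGaps_acc_max rest b1 1 b1
      have hB : maxGaps b1 rest (b1 + ((A.length : Int) - (b1 :: rest).getLastD 0))
          = max (maxGaps b1 rest 1) (b1 + ((A.length : Int) - (b1 :: rest).getLastD 0)) := by
        conv_lhs => rw [show b1 + ((A.length : Int) - (b1 :: rest).getLastD 0)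
          = max 1 (b1 + ((A.length : Int) - (b1 :: rest).getLastD 0)) by omega]
        exact maxGaps_acc_max rest b1 1 _
      rw [hA2, hB]
      have hG : (1:Int) ≤ maxGaps b1 rest 1 := maxGaps_le rest b1 1
      omega
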